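-- pv_equiv track=rewrite | github.com/CoffeeRob/Machine_Learning | LSTM.py | remove_undesirables
-- ===== SOURCE A (Python) =====
-- import string
--
-- def remove_undesirables(txt):
--     replacements = ['\n', '\r', '\xa0', '_', '*', '--', '\ufeff']
--     digits = set(string.digits)
--     for digit in digits:
--         txt = txt.replace(digit, ' ')
--     for replacement in replacements:
--         txt = txt.replace(replacement, ' ')
--     while '  ' in txt:
--         txt = txt.replace('  ', ' ')
--     return list(txt)
-- ===== SOURCE B (Python) =====
-- def remove_undesirables(txt):
--     # One left-to-right pass: '--' and every undesirable char become a space,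
--     # and consecutive spaces are collapsed inline via a prev_space flag.
--     specials = set('0123456789\n\r\xa0_*\ufeff ')
--     out = []
--     prev_space = False
--     i = 0
--     n = len(txt)
--     while i < n:
--         ch = txt[i]
--         if ch == '-' and i + 1 < n and txt[i + 1] == '-':
--             if not prev_space:
--                 out.append(' ')
--             prev_space = True
--             i += 2
--         elif ch in specials:
--             if not prev_space:
--                 out.append(' ')
--             prev_space = True
--             i += 1
--         else:
--             out.append(ch)
--             prev_space = False
--             i += 1
--     return out
-- ===== Notes on version B (the rewrite author's own statement) =====
-- stated objective: alternative
-- what changed: A runs 18+ whole-string replace passes (10 digit passes, 7 token passes, then a repeated replace loop to collapse space runs); B is one left-to-right scan with a prev_space flag that maps undesirable chars and '--' pairs to a space and collapses runs inline.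
import Mathlib
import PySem

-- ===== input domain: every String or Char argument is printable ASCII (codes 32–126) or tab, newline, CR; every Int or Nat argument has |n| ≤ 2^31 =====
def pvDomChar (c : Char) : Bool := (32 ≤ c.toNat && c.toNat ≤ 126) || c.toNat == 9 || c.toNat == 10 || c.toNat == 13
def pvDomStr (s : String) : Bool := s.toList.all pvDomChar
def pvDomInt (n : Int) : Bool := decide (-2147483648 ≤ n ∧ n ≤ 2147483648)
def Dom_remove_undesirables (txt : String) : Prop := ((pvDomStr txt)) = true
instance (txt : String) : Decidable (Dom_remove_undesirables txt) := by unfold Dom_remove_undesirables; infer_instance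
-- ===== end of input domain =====

-- B replaces A's 18+ whole-string replace passes (plus a repeated-replace collapse loop) by one
-- left-to-right scan with a prev_space flag; the equivalence below is proved for every String.

-- ===== PORT A =====
-- rep2 p is the effect of str.replace(p+p, ' '): greedy non-overlapping left-to-right pairing.
-- It is defined up here (with the lemmas go_two/replace_two/rep2_length_lt) because the port's
-- while-loop cites rep2_decreasing by name in its decreasing_by.
def rep2 (p : Char) : List Char → List Char
  | [] => []
  | [c] => [c]
  | c :: d :: t => if c = p ∧ d = p then ' ' :: rep2 p t else c :: rep2 p (d :: t)

theorem go_two (p : Char) : ∀ (fuel : Nat) (l acc : List Char), l.length ≤ fuel →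
    PySem.Chars.replace.go [p, p] [' '] fuel l acc = acc.reverse ++ rep2 p l := by
  intro fuel
  induction fuel with
  | zero =>
    intro l acc h
    have hl : l = [] := List.length_eq_zero_iff.mp (Nat.le_zero.mp h)
    subst hl; rw [PySem.Chars.replace.go.eq_def]; simp [rep2]
  | succ n ih =>
    intro l acc h
    rw [PySem.Chars.replace.go.eq_def]
    match l with
    | [] => simp [rep2]
    | [c] =>
      have hp : ([p,p]).isPrefixOf [c] = false := by simp [List.isPrefixOf]
      simp only [hp, Bool.false_eq_true, if_false]
      rw [ih [] (c :: acc) (by simp)]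
      simp [rep2]
    | c :: d :: t =>
      by_cases hc : c = p ∧ d = p
      · have hp : ([p,p]).isPrefixOf (c::d::t) = true := by simp [List.isPrefixOf, hc.1, hc.2]
        simp only [hp, if_true]
        rw [show List.drop ([p,p]).length (c::d::t) = t from rfl,
            ih t ([' '].reverse ++ acc) (by simp at h ⊢; omega)]
        simp [rep2, hc]
      · have hp : ([p,p]).isPrefixOf (c::d::t) = false := by
          simp [List.isPrefixOf]; intro h1 h2; exact absurd ⟨h1.symm, h2.symm⟩ hc
        simp only [hp, Bool.false_eq_true, if_false]
        rw [ih (d::t) (c::acc) (by simp at h ⊢; omega)]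
        simp [rep2, hc]

theorem replace_two (p : Char) (l : List Char) :
    PySem.Chars.replace l [p, p] [' '] = rep2 p l := by
  rw [PySem.Chars.replace]
  simp [go_two p l.length l [] le_rfl]

theorem rep2_length_le (p : Char) : ∀ l : List Char, (rep2 p l).length ≤ l.length := by
  intro l
  induction l using rep2.induct p with
  | case1 => simp [rep2]
  | case2 c => simp [rep2]
  | case3 c d t h ih => simp [rep2, h]; omega
  | case4 c d t h ih => simp [rep2, h] at ih ⊢; omega

theorem rep2_length_lt (l : List Char) (h : [' ', ' '] <:+: l) :
    (rep2 ' ' l).length < l.length := by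
  induction l with
  | nil => simp at h
  | cons c t ih =>
    rcases List.infix_cons_iff.mp h with hp | hi
    · match t, hp with
      | d :: t2, hp =>
        have hcd : c = ' ' ∧ d = ' ' := by
          rcases hp with ⟨r, hr⟩
          injection hr with h1 hr2; injection hr2 with h2 _
          exact ⟨h1.symm, h2.symm⟩
        simp [rep2, hcd.1, hcd.2]
        have := rep2_length_le ' ' t2
        omega
    · match t with
      | [] => simp at hi
      | d :: t2 =>
        have ht := ih hi
        by_cases hc : c = ' ' ∧ d = ' '
        · simp [rep2, hc]
          have := rep2_length_le ' ' t2
          omega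
        · simp only [rep2, if_neg hc]
          simp at ht ⊢
          omega

theorem rep2_decreasing (t : String) (h : PySem.Str.isIn "  " t = true) :
    (PySem.Str.replace t "  " " ").toList.length < t.toList.length := by
  rw [PySem.Str.toList_replace]
  rw [show ("  " : String).toList = [' ', ' '] from rfl, show (" " : String).toList = [' '] from rfl]
  rw [replace_two]
  exact rep2_length_lt _ ((PySem.Str.isIn_iff_infix _ _).mp h)

-- the 'while "  " in txt: txt = txt.replace("  ", " ")' loop of A
def collapseLoopA (t : String) : String :=
  if h : PySem.Str.isIn "  " t = true then collapseLoopA (PySem.Str.replace t "  " " ") else t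
termination_by t.toList.length
decreasing_by exact rep2_decreasing t h

def remove_undesirables (txt : String) : List String :=
  -- set(string.digits); the loop's result is independent of the set's iteration order
  -- (each pass replaces one distinct digit by a space), so insertion order is used
  let digits : PySem.Set String := PySem.Set.ofList ["0","1","2","3","4","5","6","7","8","9"]
  let t1 := List.foldl (fun t d => PySem.Str.replace t d " ") txt digits
  let reps : List String := ["\n", "\r", "\u00A0", "_", "*", "--", "\uFEFF"]
  let t2 := List.foldl (fun t r => PySem.Str.replace t r " ") t1 reps
  (collapseLoopA t2).toList.map (fun c => String.ofList [c])

-- ===== PORT B =====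
def bSpecials : List Char := "0123456789\n\r\u00A0_*\uFEFF ".toList  -- set literal (all chars distinct)

-- the while loop of Source B: prev is prev_space, the two-step advance on '--' is rest.tail
def bScan (prev : Bool) (l : List Char) : List Char :=
  match l with
  | [] => []
  | c :: rest =>
    if c = '-' ∧ rest.head? = some '-' then
      if prev then bScan true rest.tail else ' ' :: bScan true rest.tail
    else if bSpecials.contains c then
      if prev then bScan true rest else ' ' :: bScan true rest
    else c :: bScan false rest
termination_by l.length
decreasing_by all_goals (simp; try omega)

def remove_undesirables_alt (txt : String) : List String :=
  (bScan false txt.toList).map (fun c => String.ofList [c])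

-- ===== PRECONDITION & SPEC =====
def Spec_remove_undesirables (txt : String) (out : List String) : Prop := out = remove_undesirables_alt txt
instance (txt : String) (out : List String) : Decidable (Spec_remove_undesirables txt out) := by unfold Spec_remove_undesirables; infer_instance

-- ===== CLAIM (what is proved, stated in full; the proofs are below) =====
def Claim_equal_remove_undesirables : Prop := ∀ (txt : String), Dom_remove_undesirables txt → Spec_remove_undesirables txt (remove_undesirables txt)

-- ===== LEMMAS AND PROOFS =====

-- single-character replacement is a map
def hch (a x : Char) : Char := if x = a then ' ' else x

theorem go_one (a : Char) : ∀ (fuel : Nat) (l acc : List Char), l.length ≤ fuel →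
    PySem.Chars.replace.go [a] [' '] fuel l acc = acc.reverse ++ l.map (hch a) := by
  intro fuel
  induction fuel with
  | zero =>
    intro l acc h
    have hl : l = [] := List.length_eq_zero_iff.mp (Nat.le_zero.mp h)
    subst hl; rw [PySem.Chars.replace.go.eq_def]; simp
  | succ n ih =>
    intro l acc h
    rw [PySem.Chars.replace.go.eq_def]
    match l with
    | [] => simp
    | c :: t =>
      simp only [List.isPrefixOf, List.map]
      by_cases hc : c = a
      · simp [hc, ih t (' '::acc) (by simpa using Nat.le_of_succ_le_succ h), hch]
      · simp [hch, hc, ih t (c::acc) (by simpa using Nat.le_of_succ_le_succ h), beq_iff_eq, Ne.symm hc]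

theorem replace_one (a : Char) (l : List Char) :
    PySem.Chars.replace l [a] [' '] = l.map (hch a) := by
  rw [PySem.Chars.replace]
  simp [go_one a l.length l [] le_rfl]

-- collapse of space runs (the fixpoint of rep2 ' ')
def collapse : List Char → List Char
  | [] => []
  | [c] => [c]
  | a :: b :: t => if a = ' ' ∧ b = ' ' then collapse (b :: t) else a :: collapse (b :: t)

def dropOne : List Char → List Char
  | [] => []
  | c :: t => if c = ' ' then t else c :: t

theorem collapse_cons_ne (c : Char) (hc : c ≠ ' ') (r : List Char) :
    collapse (c :: r) = c :: collapse r := by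
  match r with
  | [] => rfl
  | d :: t => simp [collapse, hc]

theorem collapse_space_cons (x : List Char) :
    collapse (' ' :: x) = ' ' :: dropOne (collapse x) := by
  induction x with
  | nil => rfl
  | cons c t ih =>
    by_cases hc : c = ' '
    · subst hc
      have h1 : collapse (' ' :: ' ' :: t) = collapse (' ' :: t) := by simp [collapse]
      rw [h1, ih, dropOne]
      simp
    · rw [show collapse (' ' :: c :: t) = ' ' :: collapse (c :: t) by simp [collapse, hc]]
      rw [collapse_cons_ne c hc, dropOne]
      simp [hc]

theorem rep2_cons' (p a : Char) (x : List Char) (h : a ≠ p ∨ x.head? ≠ some p) :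
    rep2 p (a :: x) = a :: rep2 p x := by
  match x with
  | [] => rfl
  | d :: t =>
    have : ¬ (a = p ∧ d = p) := by
      rcases h with h | h
      · exact fun hc => h hc.1
      · exact fun hc => h (by simp [hc.2])
    simp [rep2, this]

theorem collapse_replicate (k : Nat) (hk : 1 ≤ k) (r : List Char) (hr : r.head? ≠ some ' ') :
    collapse (List.replicate k ' ' ++ r) = ' ' :: collapse r := by
  induction k with
  | zero => omega
  | succ n ih =>
    by_cases hn : 1 ≤ n
    · have h2 : List.replicate (n+1) ' ' ++ r = ' ' :: (List.replicate n ' ' ++ r) := by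
        simp [List.replicate_succ]
      rw [h2]
      have hhead : (List.replicate n ' ' ++ r).head? = some ' ' := by
        match n, hn with
        | m + 1, _ => simp [List.replicate_succ]
      rw [show collapse (' ' :: (List.replicate n ' ' ++ r)) = collapse (List.replicate n ' ' ++ r) by
        match n, hn with
        | m + 1, _ => simp [List.replicate_succ, collapse]]
      exact ih hn
    · have hn0 : n = 0 := by omega
      subst hn0
      simp only [List.replicate_succ, List.replicate_zero, List.nil_append, List.cons_append,
        List.nil_append]
      match r, hr with
      | [], _ => rfl
      | c :: t, hr =>
        have hc : c ≠ ' ' := by intro h; rw [h] at hr; simp at hr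
        simp [collapse, hc]

theorem rep2_replicate (k : Nat) (r : List Char) (hr : r.head? ≠ some ' ') :
    rep2 ' ' (List.replicate k ' ' ++ r) = List.replicate ((k+1)/2) ' ' ++ rep2 ' ' r := by
  induction k using Nat.strong_induction_on with
  | _ k ih =>
    match k with
    | 0 => simp
    | 1 =>
      rw [show (List.replicate 1 ' ' : List Char) ++ r = ' ' :: r by simp,
          rep2_cons' ' ' ' ' r (Or.inr hr)]
      simp
    | n + 2 =>
      have h2 : List.replicate (n+2) ' ' ++ r = ' ' :: ' ' :: (List.replicate n ' ' ++ r) := by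
        simp [List.replicate_succ]
      rw [h2, show rep2 ' ' (' ' :: ' ' :: (List.replicate n ' ' ++ r)) =
            ' ' :: rep2 ' ' (List.replicate n ' ' ++ r) by simp [rep2]]
      rw [ih n (by omega)]
      have : (n + 2 + 1) / 2 = (n + 1) / 2 + 1 := by omega
      rw [this, List.replicate_succ]
      simp

theorem head_dropWhile_space (l : List Char) :
    (l.dropWhile (· == ' ')).head? ≠ some ' ' := by
  induction l with
  | nil => simp
  | cons c t ih =>
    by_cases h : c = ' '
    · simpa [List.dropWhile_cons, h] using ih
    · simp [List.dropWhile_cons, h]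

-- collapse is invariant under one pass of rep2 ' '
theorem collapse_rep2_space (l : List Char) : collapse (rep2 ' ' l) = collapse l := by
  suffices H : ∀ (n : Nat) (l : List Char), l.length = n → collapse (rep2 ' ' l) = collapse l by
    exact H l.length l rfl
  intro n
  induction n using Nat.strong_induction_on with
  | _ n ih =>
    intro l hl
    match l with
    | [] => rfl
    | c :: t =>
      by_cases hc : c = ' '
      · subst hc
        -- decompose into the leading space run and the rest
        set k := ((' ' :: t).takeWhile (· == ' ')).length with hk
        set r := (' ' :: t).dropWhile (· == ' ') with hr
        have htw : (' ' :: t).takeWhile (· == ' ') = List.replicate k ' ' := by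
          rw [List.eq_replicate_iff]
          exact ⟨rfl, fun b hb => by simpa using List.mem_takeWhile_imp hb⟩
        have hdec : List.replicate k ' ' ++ r = ' ' :: t := by
          rw [← htw, hr, List.takeWhile_append_dropWhile]
        have hk1 : 1 ≤ k := by
          rw [hk]; simp [List.takeWhile_cons]
        have hrh : r.head? ≠ some ' ' := by rw [hr]; exact head_dropWhile_space _
        have hl' : t.length + 1 = n := by simpa using hl
        have hlen : r.length < n := by
          have h2 := congrArg List.length hdec
          simp at h2
          omega
        rw [← hdec, rep2_replicate k r hrh,
            collapse_replicate ((k+1)/2) (by omega) (rep2 ' ' r) ?_,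
            collapse_replicate k hk1 r hrh,
            ih r.length hlen r rfl]
        · match r, hrh with
          | [], _ => simp [rep2]
          | c :: t2, hrh =>
            have hc2 : c ≠ ' ' := fun h => by rw [h] at hrh; simp at hrh
            rw [rep2_cons' ' ' c t2 (Or.inl hc2)]
            simp [hc2]
      · rw [rep2_cons' ' ' c t (Or.inl hc), collapse_cons_ne c hc, collapse_cons_ne c hc,
            ih t.length (by simp at hl; omega) t rfl]

-- if no two adjacent spaces, collapse does nothing
theorem collapse_of_no_double (l : List Char) (h : ¬ [' ',' '] <:+: l) : collapse l = l := by
  induction l with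
  | nil => rfl
  | cons c t ih =>
    have ht : ¬ [' ',' '] <:+: t := fun hi => h (List.infix_cons_iff.mpr (Or.inr hi))
    match t with
    | [] => rfl
    | d :: t2 =>
      have hcd : ¬ (c = ' ' ∧ d = ' ') := by
        intro hcd
        exact h (List.infix_cons_iff.mpr (Or.inl ⟨t2, by simp [hcd.1, hcd.2]⟩))
      simp [collapse, hcd, ih ht]

theorem collapseLoopA_toList (s : String) : (collapseLoopA s).toList = collapse s.toList := by
  suffices H : ∀ (n : Nat) (s : String), s.toList.length = n → (collapseLoopA s).toList = collapse s.toList by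
    exact H s.toList.length s rfl
  intro n
  induction n using Nat.strong_induction_on with
  | _ n ih =>
    intro s hn
    rw [collapseLoopA]
    by_cases h : PySem.Str.isIn "  " s = true
    · rw [dif_pos h, ih _ (by rw [← hn]; exact rep2_decreasing s h) _ rfl]
      rw [PySem.Str.toList_replace,
          show ("  " : String).toList = [' ',' '] from rfl, show (" " : String).toList = [' '] from rfl,
          replace_two]
      exact collapse_rep2_space s.toList
    · rw [dif_neg h]
      refine (collapse_of_no_double _ ?_).symm
      intro hinf
      exact h ((PySem.Str.isIn_iff_infix _ _).mpr hinf)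

-- A's replacement passes, on the character level
def gmap (c : Char) : Char := if bSpecials.contains c then ' ' else c

-- map commutes with rep2 '-' when the function fixes '-', ' ' and creates no new '-'
theorem map_rep2_dash (φ : Char → Char) (h1 : φ '-' = '-') (h2 : ∀ c, φ c = '-' → c = '-')
    (h3 : φ ' ' = ' ') : ∀ l : List Char, (rep2 '-' l).map φ = rep2 '-' (l.map φ) := by
  intro l
  induction l using rep2.induct '-' with
  | case1 => rfl
  | case2 c => rfl
  | case3 c d t h ih =>
    rw [show rep2 '-' (c::d::t) = ' ' :: rep2 '-' t by simp [rep2, h]]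
    simp only [List.map_cons, h.1, h.2, h1]
    rw [show rep2 '-' ('-' :: '-' :: List.map φ t) = ' ' :: rep2 '-' (List.map φ t) by simp [rep2]]
    simp [h3, ih]
  | case4 c d t h ih =>
    have hne : ¬ (φ c = '-' ∧ φ d = '-') := fun hc => h ⟨h2 c hc.1, h2 d hc.2⟩
    rw [show rep2 '-' (c::d::t) = c :: rep2 '-' (d::t) by simp [rep2, h]]
    simp only [List.map_cons]
    rw [show rep2 '-' (φ c :: φ d :: List.map φ t) = φ c :: rep2 '-' (φ d :: List.map φ t) by
      simp [rep2, hne]]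
    simp only [List.map_cons] at ih
    rw [ih]

theorem bScan_nil (p : Bool) : bScan p [] = [] := by rw [bScan]

theorem bScan_cons (p : Bool) (c : Char) (rest : List Char) :
    bScan p (c :: rest) =
      if c = '-' ∧ rest.head? = some '-' then
        if p then bScan true rest.tail else ' ' :: bScan true rest.tail
      else if bSpecials.contains c then
        if p then bScan true rest else ' ' :: bScan true rest
      else c :: bScan false rest := by
  rw [bScan]

theorem gmap_dash : gmap '-' = '-' := by decide

theorem gmap_eq_dash (x : Char) (h : gmap x = '-') : x = '-' := by
  unfold gmap at h
  split at h
  · exact absurd h (by decide)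
  · exact h

-- B's scan computes collapse ∘ rep2 '-' ∘ map gmap
theorem bScan_spec : ∀ l : List Char,
    (bScan false l = collapse (rep2 '-' (l.map gmap))) ∧
    (bScan true l = dropOne (collapse (rep2 '-' (l.map gmap)))) := by
  suffices H : ∀ (n : Nat) (l : List Char), l.length = n →
      (bScan false l = collapse (rep2 '-' (l.map gmap))) ∧
      (bScan true l = dropOne (collapse (rep2 '-' (l.map gmap)))) by
    exact fun l => H l.length l rfl
  intro n
  induction n using Nat.strong_induction_on with
  | _ n ih =>
    intro l hl
    match l with
    | [] => simp [bScan_nil, rep2, collapse, dropOne]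
    | c :: t =>
      by_cases hd : c = '-' ∧ t.head? = some '-'
      · match t, hd.2 with
        | _ :: t2, h2 =>
          obtain ⟨hc, ht⟩ := hd
          subst hc
          injection ht with he
          subst he
          have hlen : t2.length < n := by simp at hl; omega
          have IH := ih t2.length hlen t2 rfl
          have hmap : ('-' :: '-' :: t2 : List Char).map gmap = '-' :: '-' :: t2.map gmap := by
            simp [gmap_dash]
          have hrep : rep2 '-' ('-' :: '-' :: t2.map gmap) = ' ' :: rep2 '-' (t2.map gmap) := by
            simp [rep2]
          constructor
          · rw [bScan_cons, if_pos ⟨rfl, rfl⟩, if_neg (by simp), hmap, hrep,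
              collapse_space_cons, List.tail_cons, IH.2]
          · rw [bScan_cons, if_pos ⟨rfl, rfl⟩, if_pos rfl, hmap, hrep,
              collapse_space_cons, List.tail_cons, IH.2]
            simp [dropOne]
      · have hlen : t.length < n := by simp at hl; omega
        have IH := ih t.length hlen t rfl
        by_cases hsp : bSpecials.contains c = true
        · have hg : gmap c = ' ' := by unfold gmap; rw [if_pos hsp]
          have hmap : (c :: t).map gmap = ' ' :: t.map gmap := by simp [hg]
          have hrep : rep2 '-' (' ' :: t.map gmap) = ' ' :: rep2 '-' (t.map gmap) :=
            rep2_cons' '-' ' ' _ (Or.inl (by decide))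
          constructor
          · rw [bScan_cons, if_neg hd, if_pos hsp, if_neg (by simp), hmap, hrep,
              collapse_space_cons, IH.2]
          · rw [bScan_cons, if_neg hd, if_pos hsp, if_pos rfl, hmap, hrep,
              collapse_space_cons, IH.2]
            simp [dropOne]
        · have hg : gmap c = c := by unfold gmap; rw [if_neg hsp]
          have hmap : (c :: t).map gmap = c :: t.map gmap := by simp [hg]
          have hcsp : c ≠ ' ' := by
            intro h; rw [h] at hsp; exact hsp (by decide)
          have hrep : rep2 '-' (c :: t.map gmap) = c :: rep2 '-' (t.map gmap) := by
            apply rep2_cons'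
            by_cases hcd : c = '-'
            · refine Or.inr ?_
              intro hhd
              rcases t with _ | ⟨d, t3⟩
              · simp at hhd
              · simp at hhd
                have : d = '-' := gmap_eq_dash d hhd
                exact hd ⟨hcd, by simp [this]⟩
            · exact Or.inl hcd
          constructor
          · rw [bScan_cons, if_neg hd, if_neg hsp, hmap, hrep,
              collapse_cons_ne c hcsp, IH.1]
          · rw [bScan_cons, if_neg hd, if_neg hsp, hmap, hrep,
              collapse_cons_ne c hcsp, IH.1]
            simp [dropOne, hcsp]

-- pointwise value of A's fifteen single-character replacement passes (plus the '\ufeff' one)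
theorem hch_chain (c : Char) :
    hch '\uFEFF' (hch '*' (hch '_' (hch '\u00A0' (hch '\r' (hch '\n' (hch '9' (hch '8' (hch '7'
      (hch '6' (hch '5' (hch '4' (hch '3' (hch '2' (hch '1' (hch '0' c))))))))))))))) = gmap c := by
  by_cases h : bSpecials.contains c = true
  · have hm : c ∈ bSpecials := by simpa using h
    have hg : gmap c = ' ' := by unfold gmap; rw [if_pos h]
    rw [hg]
    have hmem : c ∈ ['0','1','2','3','4','5','6','7','8','9','\n','\r','\u00A0','_','*','\uFEFF',' '] := hm
    fin_cases hmem <;> decide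
  · have hg : gmap c = c := by unfold gmap; rw [if_neg h]
    rw [hg]
    have hm : c ∉ bSpecials := by simpa using h
    rw [show bSpecials = ['0','1','2','3','4','5','6','7','8','9','\n','\r','\u00A0','_','*','\uFEFF',' '] from rfl] at hm
    simp only [List.mem_cons, not_or] at hm
    simp only [List.not_mem_nil, or_false] at hm
    obtain ⟨h0,h1,h2,h3,h4,h5,h6,h7,h8,h9,hn,hr,ha,hu,hstar,hf,hsp⟩ := hm
    simp [hch, h0,h1,h2,h3,h4,h5,h6,h7,h8,h9,hn,hr,ha,hu,hstar,hf]

theorem foldl_str_toList (ds : List String) (s : String) :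
    (List.foldl (fun t d => PySem.Str.replace t d " ") s ds).toList
      = List.foldl (fun l d => PySem.Chars.replace l d.toList [' ']) s.toList ds := by
  induction ds generalizing s with
  | nil => rfl
  | cons d ds ih =>
    simp only [List.foldl_cons]
    rw [ih, PySem.Str.toList_replace]
    rfl

theorem hch_feff (c : Char) (h : hch '\uFEFF' c = '-') : c = '-' := by
  unfold hch at h
  split at h
  · exact absurd h (by decide)
  · exact h

-- the string A has built just before its collapse loop, on the character level
set_option maxHeartbeats 1000000 in
theorem pipeline (txt : String) :
    (List.foldl (fun t r => PySem.Str.replace t r " ")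
      (List.foldl (fun t d => PySem.Str.replace t d " ") txt
        (PySem.Set.ofList ["0","1","2","3","4","5","6","7","8","9"]))
      ["\n", "\r", "\u00A0", "_", "*", "--", "\uFEFF"]).toList
    = rep2 '-' (txt.toList.map gmap) := by
  rw [show PySem.Set.ofList ["0","1","2","3","4","5","6","7","8","9"]
        = (["0","1","2","3","4","5","6","7","8","9"] : List String) from by decide]
  rw [foldl_str_toList, foldl_str_toList]
  simp only [List.foldl_cons, List.foldl_nil]
  rw [show ("0":String).toList = ['0'] from rfl, show ("1":String).toList = ['1'] from rfl,
      show ("2":String).toList = ['2'] from rfl, show ("3":String).toList = ['3'] from rfl,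
      show ("4":String).toList = ['4'] from rfl, show ("5":String).toList = ['5'] from rfl,
      show ("6":String).toList = ['6'] from rfl, show ("7":String).toList = ['7'] from rfl,
      show ("8":String).toList = ['8'] from rfl, show ("9":String).toList = ['9'] from rfl,
      show ("\n":String).toList = ['\n'] from rfl, show ("\r":String).toList = ['\r'] from rfl,
      show ("\u00A0":String).toList = ['\u00A0'] from rfl, show ("_":String).toList = ['_'] from rfl,
      show ("*":String).toList = ['*'] from rfl, show ("--":String).toList = ['-','-'] from rfl,
      show ("\uFEFF":String).toList = ['\uFEFF'] from rfl]
  simp only [replace_one, replace_two, List.map_map]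
  refine Eq.trans (map_rep2_dash (hch '\uFEFF') (by decide) hch_feff (by decide) _) ?_
  simp only [List.map_map]
  exact congrArg (rep2 '-')
    (List.map_congr_left (fun c _ => by simpa [Function.comp] using hch_chain c))

-- ===== VERDICT (by name: the statement is the Claim_ definition above) =====
theorem remove_undesirables_spec : Claim_equal_remove_undesirables := by
  unfold Claim_equal_remove_undesirables
  intro txt _
  unfold Spec_remove_undesirables
  simp only [remove_undesirables, remove_undesirables_alt]
  refine congrArg _ ?_
  rw [collapseLoopA_toList, pipeline, (bScan_spec txt.toList).1]
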